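-- pv_equiv track=rewrite | github.com/fergusleen/Amshole | tools/image_to_edit_tf.py | promote_interior_to_full_blocks
-- ===== SOURCE A (Python) =====
-- def promote_interior_to_full_blocks(cell_bits_rows: list[list[int]]) -> list[list[int]]:
--     if not cell_bits_rows: return cell_bits_rows
--     FULL_BLOCK = 0x5F # Bits 0,1,2,3,4,6
--     rows, cols = len(cell_bits_rows), len(cell_bits_rows[0])
--     promoted = [row[:] for row in cell_bits_rows]
--     for y in range(1, rows - 1):
--         for x in range(1, cols - 1):
--             if cell_bits_rows[y][x] == 0 or cell_bits_rows[y][x] == FULL_BLOCK: continue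
--             if sum(1 for dy in (-1,0,1) for dx in (-1,0,1) if (dx!=0 or dy!=0) and cell_bits_rows[y+dy][x+dx] != 0) >= 6:
--                 promoted[y][x] = FULL_BLOCK
--     return promoted
-- ===== SOURCE B (Python) =====
-- def promote_interior_to_full_blocks(cell_bits_rows: list[list[int]]) -> list[list[int]]:
--     if not cell_bits_rows: return cell_bits_rows
--     FULL_BLOCK = 0x5F
--     rows, cols = len(cell_bits_rows), len(cell_bits_rows[0])
--     out = [row[:] for row in cell_bits_rows]
--     if rows < 3 or cols < 3:
--         return out
--     # occupancy matrix + horizontal 3-wide window sums (separable convolution)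
--     occ = [[0 if v == 0 else 1 for v in row[:cols]] for row in cell_bits_rows]
--     hs = [[r[x - 1] + r[x] + r[x + 1] for x in range(1, cols - 1)] for r in occ]
--     for y in range(1, rows - 1):
--         row = cell_bits_rows[y]
--         for x in range(1, cols - 1):
--             v = row[x]
--             if v != 0 and v != FULL_BLOCK and hs[y - 1][x - 1] + hs[y][x - 1] + hs[y + 1][x - 1] - occ[y][x] >= 6:
--                 out[y][x] = FULL_BLOCK
--     return out
-- ===== Notes on version B (the rewrite author's own statement) =====
-- stated objective: faster
-- what changed: Replaces the per-cell 8-neighbour generator scan with a precomputed 0/1 occupancy matrix and horizontal 3-wide window sums (separable convolution); each interior cell's neighbour count becomes three table lookups minus the cell's own occupancy, removing the per-cell 9-term generator-expression overhead.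
-- outside the precondition, e.g. on promote_interior_to_full_blocks([[1, 1, 1], [1, 0], [1, 1, 1]]): A returns [[1, 1, 1], [1, 0], [1, 1, 1]], B raises IndexError
import Mathlib
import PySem

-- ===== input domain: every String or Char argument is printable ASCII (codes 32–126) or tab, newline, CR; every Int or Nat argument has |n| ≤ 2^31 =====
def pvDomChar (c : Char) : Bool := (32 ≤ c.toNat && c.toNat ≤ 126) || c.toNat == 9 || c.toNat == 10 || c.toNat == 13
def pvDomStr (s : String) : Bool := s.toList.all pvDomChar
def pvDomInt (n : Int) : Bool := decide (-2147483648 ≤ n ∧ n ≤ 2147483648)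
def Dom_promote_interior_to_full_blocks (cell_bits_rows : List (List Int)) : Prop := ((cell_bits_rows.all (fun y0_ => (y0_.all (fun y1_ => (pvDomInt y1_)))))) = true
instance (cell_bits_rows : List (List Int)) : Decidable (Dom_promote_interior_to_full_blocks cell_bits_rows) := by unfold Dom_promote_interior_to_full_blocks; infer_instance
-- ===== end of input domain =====

-- B replaces the per-cell 8-neighbour scan by a precomputed 0/1 occupancy matrix and
-- horizontal 3-wide window sums (separable convolution); objective: faster by a constant
-- factor (measured).

-- ===== PORT A =====
-- cell_bits_rows[y][x]; all indices reached by the loops are in range under Pre_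
def pvCellA (g : List (List Int)) (y x : Int) : Int :=
  PySem.List.pyGetD (PySem.List.pyGetD g y []) x 0

-- sum(1 for dy in (-1,0,1) for dx in (-1,0,1) if (dx!=0 or dy!=0) and cell_bits_rows[y+dy][x+dx] != 0)
def pvNbrA (g : List (List Int)) (y x : Int) : Int :=
  ([-1, 0, 1] : List Int).foldl (fun s dy =>
    ([-1, 0, 1] : List Int).foldl (fun s dx =>
      if (dx ≠ 0 ∨ dy ≠ 0) ∧ pvCellA g (y + dy) (x + dx) ≠ 0 then s + 1 else s) s) 0

def promote_interior_to_full_blocks (cell_bits_rows : List (List Int)) : List (List Int) :=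
  if cell_bits_rows = [] then cell_bits_rows else
  let rows : Int := cell_bits_rows.length
  let cols : Int := (cell_bits_rows.headD []).length
  let promoted := cell_bits_rows.map (fun row => PySem.List.slice row none none)
  (PySem.List.pyRange 1 (rows - 1) 1).foldl (fun prom y =>
    (PySem.List.pyRange 1 (cols - 1) 1).foldl (fun prom x =>
      if pvCellA cell_bits_rows y x = 0 ∨ pvCellA cell_bits_rows y x = 95 then prom
      else if pvNbrA cell_bits_rows y x ≥ 6 then
        -- promoted[y][x] = FULL_BLOCK; y, x ≥ 1 here
        PySem.List.pySetD prom y (PySem.List.pySetD (PySem.List.pyGetD prom y []) x 95)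
      else prom) prom) promoted

-- ===== PORT B =====
def pvOcc (v : Int) : Int := if v = 0 then 0 else 1

-- [0 if v == 0 else 1 for v in row[:cols]]
def pvRowOcc (cols : Int) (row : List Int) : List Int :=
  (PySem.List.slice row none (some cols)).map pvOcc

-- [r[x-1] + r[x] + r[x+1] for x in range(1, cols-1)]
def pvRowHs (cols : Int) (r : List Int) : List Int :=
  (PySem.List.pyRange 1 (cols - 1) 1).map (fun x =>
    PySem.List.pyGetD r (x - 1) 0 + PySem.List.pyGetD r x 0 + PySem.List.pyGetD r (x + 1) 0)

def promote_interior_to_full_blocks_alt (cell_bits_rows : List (List Int)) : List (List Int) :=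
  if cell_bits_rows = [] then cell_bits_rows else
  let rows : Int := cell_bits_rows.length
  let cols : Int := (cell_bits_rows.headD []).length
  let out := cell_bits_rows.map (fun row => PySem.List.slice row none none)
  if rows < 3 ∨ cols < 3 then out else
  let occ := cell_bits_rows.map (pvRowOcc cols)
  let hs := occ.map (pvRowHs cols)
  (PySem.List.pyRange 1 (rows - 1) 1).foldl (fun out y =>
    let row := PySem.List.pyGetD cell_bits_rows y []
    (PySem.List.pyRange 1 (cols - 1) 1).foldl (fun out x =>
      let v := PySem.List.pyGetD row x 0
      if v ≠ 0 ∧ v ≠ 95 ∧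
          PySem.List.pyGetD (PySem.List.pyGetD hs (y - 1) []) (x - 1) 0 +
          PySem.List.pyGetD (PySem.List.pyGetD hs y []) (x - 1) 0 +
          PySem.List.pyGetD (PySem.List.pyGetD hs (y + 1) []) (x - 1) 0 -
          PySem.List.pyGetD (PySem.List.pyGetD occ y []) x 0 ≥ 6 then
        PySem.List.pySetD out y (PySem.List.pySetD (PySem.List.pyGetD out y []) x 95)
      else out) out) out

-- ===== PRECONDITION & SPEC =====
-- Pre_ excludes ragged grids with a ≥3×≥3 frame (some row shorter than row 0): there A raises
-- IndexError on any non-zero, non-FULL_BLOCK interior cell, and on the remaining ragged grids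
-- (all-zero/FULL_BLOCK interior) A's returning at all is an accident of its 'continue'
-- short-circuit that B's precomputed tables cannot reproduce (B raises IndexError there).
def Pre_promote_interior_to_full_blocks (cell_bits_rows : List (List Int)) : Prop :=
  cell_bits_rows.length < 3 ∨ (cell_bits_rows.headD []).length < 3 ∨
    ∀ r ∈ cell_bits_rows, (cell_bits_rows.headD []).length ≤ r.length

instance (cell_bits_rows : List (List Int)) : Decidable (Pre_promote_interior_to_full_blocks cell_bits_rows) := by
  unfold Pre_promote_interior_to_full_blocks; infer_instance

def pvWitness_promote_interior_to_full_blocks : List (List Int) :=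
  [[1, 2, 3], [4, 5, 6], [7, 8, 9]]

def Spec_promote_interior_to_full_blocks (cell_bits_rows : List (List Int)) (out : List (List Int)) : Prop := out = promote_interior_to_full_blocks_alt cell_bits_rows
instance (cell_bits_rows : List (List Int)) (out : List (List Int)) : Decidable (Spec_promote_interior_to_full_blocks cell_bits_rows out) := by unfold Spec_promote_interior_to_full_blocks; infer_instance

-- ===== CLAIM (what is proved, stated in full; the proofs are below) =====
def Claim_equal_promote_interior_to_full_blocks : Prop := ∀ (cell_bits_rows : List (List Int)), Dom_promote_interior_to_full_blocks cell_bits_rows → Pre_promote_interior_to_full_blocks cell_bits_rows → Spec_promote_interior_to_full_blocks cell_bits_rows (promote_interior_to_full_blocks cell_bits_rows)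

-- ===== LEMMAS AND PROOFS =====

theorem pvCellA_eq (g : List (List Int)) (y x : Int) :
    PySem.List.pyGetD (PySem.List.pyGetD g y []) x 0 = pvCellA g y x := rfl

theorem pv_map_get {α β : Type} (f : α → β) (l : List α) (i : Int) (da : α) (db : β)
    (h0 : 0 ≤ i) (hi : i < (l.length : Int)) :
    PySem.List.pyGetD (l.map f) i db = f (PySem.List.pyGetD l i da) := by
  rw [PySem.List.pyGetD_eq_getElem _ db h0 (by simpa using hi),
      PySem.List.pyGetD_eq_getElem _ da h0 hi]
  simp

theorem pv_occ_get (r : List Int) (C : Nat) (hC : C ≤ r.length) (j : Int)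
    (h0 : 0 ≤ j) (hj : j < (C : Int)) :
    PySem.List.pyGetD (pvRowOcc (C : Int) r) j 0 = pvOcc (PySem.List.pyGetD r j 0) := by
  unfold pvRowOcc
  rw [PySem.List.slice_to_natCast]
  rw [PySem.List.pyGetD_eq_getElem _ 0 h0 (by simp; omega),
      PySem.List.pyGetD_eq_getElem _ 0 h0 (by omega)]
  simp [List.getElem_take]

theorem pv_hs_get (r : List Int) (C : Nat) (x : Int) (h1 : 1 ≤ x) (h2 : x < (C : Int) - 1) :
    PySem.List.pyGetD (pvRowHs (C : Int) r) (x - 1) 0 =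
      PySem.List.pyGetD r (x - 1) 0 + PySem.List.pyGetD r x 0 + PySem.List.pyGetD r (x + 1) 0 := by
  unfold pvRowHs
  have hx : x - 1 = (((x - 1).toNat : Nat) : Int) := by omega
  rw [hx, PySem.List.pyGetD_map_pyRange_one _ 1 ((C : Int) - 1) (x - 1).toNat 0 (by omega)]
  have h1' : (1 : Int) + ((x - 1).toNat : Int) = x := by omega
  rw [h1', ← hx]

theorem pv_ite_step (P : Prop) [Decidable P] (s : Int) :
    (if P then s + 1 else s) = s + (if P then 1 else 0) := by
  split <;> ring

theorem pvNbrA_closed (g : List (List Int)) (y x : Int) :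
    pvNbrA g y x =
      pvOcc (pvCellA g (y - 1) (x - 1)) + pvOcc (pvCellA g (y - 1) x) + pvOcc (pvCellA g (y - 1) (x + 1)) +
      pvOcc (pvCellA g y (x - 1)) + pvOcc (pvCellA g y (x + 1)) +
      pvOcc (pvCellA g (y + 1) (x - 1)) + pvOcc (pvCellA g (y + 1) x) + pvOcc (pvCellA g (y + 1) (x + 1)) := by
  have e1 : ∀ z : Int, z + -1 = z - 1 := fun z => by ring
  simp only [pvNbrA, List.foldl_cons, List.foldl_nil, pv_ite_step, add_zero, e1]
  norm_num
  simp only [pvOcc]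

theorem pv_count_eq (g : List (List Int)) (y x : Int)
    (hrect : ∀ r ∈ g, (g.headD []).length ≤ r.length)
    (hy1 : 1 ≤ y) (hy2 : y < (g.length : Int) - 1)
    (hx1 : 1 ≤ x) (hx2 : x < ((g.headD []).length : Int) - 1) :
    PySem.List.pyGetD (PySem.List.pyGetD ((g.map (pvRowOcc ((g.headD []).length : Int))).map (pvRowHs ((g.headD []).length : Int))) (y - 1) []) (x - 1) 0 +
    PySem.List.pyGetD (PySem.List.pyGetD ((g.map (pvRowOcc ((g.headD []).length : Int))).map (pvRowHs ((g.headD []).length : Int))) y []) (x - 1) 0 +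
    PySem.List.pyGetD (PySem.List.pyGetD ((g.map (pvRowOcc ((g.headD []).length : Int))).map (pvRowHs ((g.headD []).length : Int))) (y + 1) []) (x - 1) 0 -
    PySem.List.pyGetD (PySem.List.pyGetD (g.map (pvRowOcc ((g.headD []).length : Int))) y []) x 0
    = pvNbrA g y x := by
  have hrowlen : ∀ i : Int, 0 ≤ i → i < (g.length : Int) →
      (g.headD []).length ≤ (PySem.List.pyGetD g i ([] : List Int)).length := by
    intro i h0 hi
    rw [PySem.List.pyGetD_eq_getElem g [] h0 hi]
    exact hrect _ (List.getElem_mem _)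
  have hmap2 : ∀ i : Int, 0 ≤ i → i < (g.length : Int) →
      PySem.List.pyGetD ((g.map (pvRowOcc ((g.headD []).length : Int))).map (pvRowHs ((g.headD []).length : Int))) i ([] : List Int) =
        pvRowHs ((g.headD []).length : Int) (pvRowOcc ((g.headD []).length : Int) (PySem.List.pyGetD g i [])) := by
    intro i h0 hi
    rw [pv_map_get (pvRowHs ((g.headD []).length : Int)) _ i [] [] h0 (by simpa using hi),
        pv_map_get (pvRowOcc ((g.headD []).length : Int)) g i [] [] h0 hi]
  rw [hmap2 (y - 1) (by omega) (by omega), hmap2 y (by omega) (by omega),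
      hmap2 (y + 1) (by omega) (by omega),
      pv_map_get (pvRowOcc ((g.headD []).length : Int)) g y [] [] (by omega) (by omega)]
  rw [pv_hs_get _ _ x hx1 hx2, pv_hs_get _ _ x hx1 hx2, pv_hs_get _ _ x hx1 hx2]
  have hl1 := hrowlen (y - 1) (by omega) (by omega)
  have hl2 := hrowlen y (by omega) (by omega)
  have hl3 := hrowlen (y + 1) (by omega) (by omega)
  rw [pv_occ_get _ _ hl1 (x - 1) (by omega) (by omega), pv_occ_get _ _ hl1 x (by omega) (by omega),
      pv_occ_get _ _ hl1 (x + 1) (by omega) (by omega),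
      pv_occ_get _ _ hl2 (x - 1) (by omega) (by omega), pv_occ_get _ _ hl2 x (by omega) (by omega),
      pv_occ_get _ _ hl2 (x + 1) (by omega) (by omega),
      pv_occ_get _ _ hl3 (x - 1) (by omega) (by omega), pv_occ_get _ _ hl3 x (by omega) (by omega),
      pv_occ_get _ _ hl3 (x + 1) (by omega) (by omega)]
  rw [pvNbrA_closed]
  simp only [pvCellA]
  omega

-- ===== VERDICT (by name: the statement is the Claim_ definition above) =====
theorem promote_interior_to_full_blocks_spec : Claim_equal_promote_interior_to_full_blocks := by
  intro g _ hpre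
  unfold Spec_promote_interior_to_full_blocks
  by_cases hg : g = []
  · simp [promote_interior_to_full_blocks, promote_interior_to_full_blocks_alt, hg]
  · simp only [promote_interior_to_full_blocks, promote_interior_to_full_blocks_alt, if_neg hg]
    by_cases hsm : ((g.length : Int) < 3 ∨ (((g.headD []).length : Nat) : Int) < 3)
    · rw [if_pos hsm]
      rcases hsm with h | h
      · rw [PySem.List.pyRange_one_eq_nil (show (g.length : Int) - 1 ≤ 1 by omega)]
        simp
      · simp only [PySem.List.pyRange_one_eq_nil
          (show ((g.headD []).length : Int) - 1 ≤ 1 by omega), List.foldl_nil]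
        simp [List.foldl_fixed]
    · rw [if_neg hsm]
      push Not at hsm
      obtain ⟨hr3, hc3⟩ := hsm
      have hrect : ∀ r ∈ g, (g.headD []).length ≤ r.length := by
        rcases hpre with h | h | h
        · exact absurd h (by omega)
        · exact absurd h (by omega)
        · exact h
      apply PySem.List.foldl_congr_mem
      intro prom y hy
      rw [PySem.List.mem_pyRange_one] at hy
      dsimp only
      apply PySem.List.foldl_congr_mem
      intro acc x hx
      rw [PySem.List.mem_pyRange_one] at hx
      dsimp only
      rw [pvCellA_eq g y x]
      rw [pv_count_eq g y x hrect hy.1 hy.2 hx.1 hx.2]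
      by_cases h0 : pvCellA g y x = 0
      · simp [h0]
      · by_cases h95 : pvCellA g y x = 95
        · simp [h95]
        · by_cases h6 : pvNbrA g y x ≥ 6
          · simp [h0, h95, h6]
          · simp [h0, h95, h6]
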